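-- pv_equiv track=rewrite | github.com/dbetm/cp-history | Interviews/CrackingTheCodeInterview/BitManipulation/AC_Opt_NextSmallestLargest.py | turn_on_next_zero_after_one
-- ===== SOURCE A (Python) =====
-- from typing import Tuple
--
-- def turn_on_next_zero_after_one(str_bin: str) -> Tuple[str, int]:
--     len_size = len(str_bin)
--     new_str = ""
--     has_found_one = False
--     has_to_add_digit = True
--     ptr = -1
--
--     for i in range(len_size - 1, -1, -1):
--         if str_bin[i] == "0" and has_found_one:
--             new_str += "1"
--             new_str += str_bin[:i][::-1]
--             has_to_add_digit = False
--             ptr += 1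
--             break
--
--         if str_bin[i] == "1" and not has_found_one:
--             has_found_one = True
--
--         new_str += str_bin[i]
--         ptr += 1
--
--     if has_to_add_digit:
--         new_str = ("0" * len_size) + "1"
--         ptr += 1
--
--     return (new_str[::-1], ptr)
-- ===== SOURCE B (Python) =====
-- def turn_on_next_zero_after_one(str_bin):
--     n = len(str_bin)
--     r = str_bin.rfind('1')
--     if r == -1:
--         return ('1' + '0' * n, n)
--     i = str_bin.rfind('0', 0, r)
--     if i == -1:
--         return ('1' + '0' * n, n)
--     return (str_bin[:i] + '1' + str_bin[i + 1:], n - 1 - i)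
-- ===== Notes on version B (the rewrite author's own statement) =====
-- stated objective: simpler
-- what changed: Replaces A's right-to-left char-by-char reversed-string-building loop with flags by two rfind index locates (rightmost '1', then rightmost '0' left of it) and a single slice splice.
import Mathlib
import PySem

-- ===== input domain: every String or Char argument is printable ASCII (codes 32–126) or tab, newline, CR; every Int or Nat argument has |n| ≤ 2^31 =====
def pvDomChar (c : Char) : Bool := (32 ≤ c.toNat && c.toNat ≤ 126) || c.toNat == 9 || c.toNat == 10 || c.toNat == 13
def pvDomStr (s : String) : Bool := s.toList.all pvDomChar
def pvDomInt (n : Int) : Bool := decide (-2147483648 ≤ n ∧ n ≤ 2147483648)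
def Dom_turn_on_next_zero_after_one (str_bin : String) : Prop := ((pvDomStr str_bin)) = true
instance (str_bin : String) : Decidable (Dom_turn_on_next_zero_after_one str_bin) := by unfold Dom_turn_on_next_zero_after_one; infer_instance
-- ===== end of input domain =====

-- B replaces A's right-to-left reversed-string-building loop (with flags) by two rfind
-- index locates plus one slice splice; objective: simpler. Proved equal on all inputs.

-- ===== PORT A =====
-- A's loop runs i = len-1 … 0 over str_bin[i]; we recurse over str_bin reversed, so the
-- list still to visit is exactly str_bin[:i][::-1] (the very value A appends on break).
-- State = (new_str as list, has_found_one, has_to_add_digit, ptr), exactly A's variables.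
def pvLoopA : List Char → List Char → Bool → Bool → Int → (List Char × Bool × Bool × Int)
  | [], ns, found, add, ptr => (ns, found, add, ptr)
  | c :: rem, ns, found, add, ptr =>
    if c = '0' ∧ found = true then
      -- new_str += "1"; new_str += str_bin[:i][::-1]; has_to_add_digit = False; ptr += 1; break
      (ns ++ '1' :: rem, found, false, ptr + 1)
    else
      pvLoopA rem (ns ++ [c]) (if c = '1' ∧ found = false then true else found) add (ptr + 1)

def turn_on_next_zero_after_one (str_bin : String) : String × Int :=
  let cs := str_bin.toList
  let len_size := cs.length
  let st := pvLoopA cs.reverse [] false true (-1)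
  -- st = (new_str, has_found_one, has_to_add_digit, ptr)
  let new_str := if st.2.2.1 then List.replicate len_size '0' ++ ['1'] else st.1
  let ptr : Int := if st.2.2.1 then st.2.2.2 + 1 else st.2.2.2
  (String.ofList new_str.reverse, ptr)

-- ===== PORT B =====
-- str.rfind(c): index of the rightmost occurrence, -1 if absent (first hit scanning the
-- reversed list); pvFirstIdx is that left-to-right scan.
def pvFirstIdx (c : Char) : List Char → Option Nat
  | [] => none
  | x :: xs => if x = c then some 0 else (pvFirstIdx c xs).map (· + 1)

def pvRfind (c : Char) (l : List Char) : Int :=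
  match pvFirstIdx c l.reverse with
  | none => -1
  | some j => (l.length : Int) - 1 - (j : Int)

def turn_on_next_zero_after_one_alt (str_bin : String) : String × Int :=
  let cs := str_bin.toList
  let n := cs.length
  let r := pvRfind '1' cs
  if r = -1 then (String.ofList ('1' :: List.replicate n '0'), (n : Int))
  else
    -- str_bin.rfind('0', 0, r): rfind on the slice str_bin[:r]; r ≥ 0 in this branch
    let i := pvRfind '0' (cs.take r.toNat)
    if i = -1 then (String.ofList ('1' :: List.replicate n '0'), (n : Int))
    else (String.ofList (cs.take i.toNat ++ '1' :: cs.drop (i.toNat + 1)), (n : Int) - 1 - i)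

-- ===== PRECONDITION & SPEC =====
def Spec_turn_on_next_zero_after_one (str_bin : String) (out : String × Int) : Prop := out = turn_on_next_zero_after_one_alt str_bin
instance (str_bin : String) (out : String × Int) : Decidable (Spec_turn_on_next_zero_after_one str_bin out) := by unfold Spec_turn_on_next_zero_after_one; infer_instance

-- ===== CLAIM (what is proved, stated in full; the proofs are below) =====
def Claim_equal_turn_on_next_zero_after_one : Prop := ∀ (str_bin : String), Dom_turn_on_next_zero_after_one str_bin → Spec_turn_on_next_zero_after_one str_bin (turn_on_next_zero_after_one str_bin)

-- ===== LEMMAS AND PROOFS =====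

lemma pvFirstIdx_lt {c : Char} : ∀ {xs : List Char} {j : Nat}, pvFirstIdx c xs = some j → j < xs.length := by
  intro xs
  induction xs with
  | nil => intro j h; simp [pvFirstIdx] at h
  | cons x xs ih =>
    intro j h
    by_cases hx : x = c
    · simp [pvFirstIdx, hx] at h
      subst h
      simp
    · simp [pvFirstIdx, hx] at h
      obtain ⟨j', hj', rfl⟩ := h
      have := ih hj'
      simp
      omega

-- A's loop with has_found_one = True: copies chars until the first '0', where it breaks.
lemma pvLoopA_true : ∀ (rem ns : List Char) (add : Bool) (ptr : Int),
    pvLoopA rem ns true add ptr =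
      match pvFirstIdx '0' rem with
      | none => (ns ++ rem, true, add, ptr + rem.length)
      | some j => (ns ++ rem.take j ++ '1' :: rem.drop (j+1), true, false, ptr + (j+1)) := by
  intro rem
  induction rem with
  | nil => intro ns add ptr; simp [pvLoopA, pvFirstIdx]
  | cons c rem ih =>
    intro ns add ptr
    by_cases hc : c = '0'
    · subst hc; simp [pvLoopA, pvFirstIdx]
    · have hstep : pvLoopA (c :: rem) ns true add ptr = pvLoopA rem (ns ++ [c]) true add (ptr + 1) := by
        simp [pvLoopA, hc]
      rw [hstep, ih]
      cases h : pvFirstIdx '0' rem with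
      | none =>
        simp [pvFirstIdx, hc, h]
        omega
      | some j =>
        simp [pvFirstIdx, hc, h]
        omega

-- A's loop with has_found_one = False: copies chars until the first '1', which sets the flag.
lemma pvLoopA_false : ∀ (rem ns : List Char) (ptr : Int),
    pvLoopA rem ns false true ptr =
      match pvFirstIdx '1' rem with
      | none => (ns ++ rem, false, true, ptr + rem.length)
      | some j => pvLoopA (rem.drop (j+1)) (ns ++ rem.take (j+1)) true true (ptr + (j+1)) := by
  intro rem
  induction rem with
  | nil => intro ns ptr; simp [pvLoopA, pvFirstIdx]
  | cons c rem ih =>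
    intro ns ptr
    by_cases hc : c = '1'
    · subst hc; simp [pvLoopA, pvFirstIdx]
    · have hstep : pvLoopA (c :: rem) ns false true ptr = pvLoopA rem (ns ++ [c]) false true (ptr + 1) := by
        simp [pvLoopA, hc]
      rw [hstep, ih]
      cases h : pvFirstIdx '1' rem with
      | none =>
        simp [pvFirstIdx, hc, h]
        omega
      | some j =>
        simp only [pvFirstIdx, if_neg hc, h, Option.map_some]
        have h1 : (ns ++ [c]) ++ rem.take (j+1) = ns ++ (c :: rem).take (j+1+1) := by simp
        have h2 : ptr + 1 + ((j:Int)+1) = ptr + ((j+1:Nat)+1) := by push_cast; ring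
        rw [h1, h2]
        simp

-- A's value in the three cases -------------------------------------------------

lemma A_case1 (cs : List Char) (h1 : pvFirstIdx '1' cs.reverse = none) :
    turn_on_next_zero_after_one (String.ofList cs) =
      (String.ofList ('1' :: List.replicate cs.length '0'), (cs.length : Int)) := by
  simp only [turn_on_next_zero_after_one, String.toList_ofList]
  simp only [pvLoopA_false, h1]
  simp

lemma A_case2 (cs : List Char) (j1 : Nat) (h1 : pvFirstIdx '1' cs.reverse = some j1)
    (h2 : pvFirstIdx '0' (cs.reverse.drop (j1+1)) = none) :
    turn_on_next_zero_after_one (String.ofList cs) =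
      (String.ofList ('1' :: List.replicate cs.length '0'), (cs.length : Int)) := by
  have hj1 : j1 < cs.length := by simpa using pvFirstIdx_lt h1
  simp only [turn_on_next_zero_after_one, String.toList_ofList]
  simp only [pvLoopA_false, h1, pvLoopA_true, h2]
  simp
  omega

lemma A_case3 (cs : List Char) (j1 j2 : Nat) (h1 : pvFirstIdx '1' cs.reverse = some j1)
    (h2 : pvFirstIdx '0' (cs.reverse.drop (j1+1)) = some j2) :
    turn_on_next_zero_after_one (String.ofList cs) =
      (String.ofList ((cs.reverse.take (j1+1) ++ (cs.reverse.drop (j1+1)).take j2 ++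
          '1' :: (cs.reverse.drop (j1+1)).drop (j2+1)).reverse),
        (j1 : Int) + j2 + 1) := by
  simp only [turn_on_next_zero_after_one, String.toList_ofList]
  simp only [pvLoopA_false, h1, pvLoopA_true, h2]
  simp
  ring

-- B's value in the three cases -------------------------------------------------

lemma B_case1 (cs : List Char) (h1 : pvFirstIdx '1' cs.reverse = none) :
    turn_on_next_zero_after_one_alt (String.ofList cs) =
      (String.ofList ('1' :: List.replicate cs.length '0'), (cs.length : Int)) := by
  simp only [turn_on_next_zero_after_one_alt, pvRfind, String.toList_ofList]
  rw [h1]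
  simp

lemma B_take_drop (cs : List Char) (j1 : Nat) (hj1 : j1 < cs.length) :
    (cs.take (cs.length - 1 - j1)).reverse = cs.reverse.drop (j1+1) := by
  rw [List.reverse_take]
  congr 1
  omega

lemma B_case2 (cs : List Char) (j1 : Nat) (h1 : pvFirstIdx '1' cs.reverse = some j1)
    (h2 : pvFirstIdx '0' (cs.reverse.drop (j1+1)) = none) :
    turn_on_next_zero_after_one_alt (String.ofList cs) =
      (String.ofList ('1' :: List.replicate cs.length '0'), (cs.length : Int)) := by
  have hj1 : j1 < cs.length := by simpa using pvFirstIdx_lt h1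
  simp only [turn_on_next_zero_after_one_alt, String.toList_ofList]
  have e1 : pvRfind '1' cs = (cs.length : Int) - 1 - j1 := by
    unfold pvRfind; rw [h1]
  have hr : ((cs.length : Int) - 1 - j1) ≠ -1 := by omega
  have hrt : ((cs.length : Int) - 1 - j1).toNat = cs.length - 1 - j1 := by omega
  have e2 : pvRfind '0' (cs.take (cs.length - 1 - j1)) = -1 := by
    unfold pvRfind; rw [B_take_drop cs j1 hj1, h2]
  simp only [e1, if_neg hr, hrt, e2]
  simp

lemma B_case3 (cs : List Char) (j1 j2 : Nat) (h1 : pvFirstIdx '1' cs.reverse = some j1)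
    (h2 : pvFirstIdx '0' (cs.reverse.drop (j1+1)) = some j2) :
    turn_on_next_zero_after_one_alt (String.ofList cs) =
      (String.ofList (cs.take (cs.length - 1 - (j1+1+j2)) ++
          '1' :: cs.drop (cs.length - 1 - (j1+1+j2) + 1)),
        (cs.length : Int) - 1 - ((cs.length : Int) - 1 - (j1+1+j2))) := by
  have hj1 : j1 < cs.length := by simpa using pvFirstIdx_lt h1
  have hj2 : j2 < cs.length - (j1+1) := by simpa using pvFirstIdx_lt h2
  simp only [turn_on_next_zero_after_one_alt, String.toList_ofList]
  have e1 : pvRfind '1' cs = (cs.length : Int) - 1 - j1 := by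
    unfold pvRfind; rw [h1]
  have hr : ((cs.length : Int) - 1 - j1) ≠ -1 := by omega
  have hrt : ((cs.length : Int) - 1 - j1).toNat = cs.length - 1 - j1 := by omega
  have hlen2 : (cs.take (cs.length - 1 - j1)).length = cs.length - 1 - j1 := by
    simp; omega
  have e2 : pvRfind '0' (cs.take (cs.length - 1 - j1)) = (cs.length : Int) - 1 - (j1+1+j2) := by
    unfold pvRfind
    rw [B_take_drop cs j1 hj1, h2, hlen2]
    push_cast
    omega
  have hi : ((cs.length : Int) - 1 - (j1+1+j2)) ≠ -1 := by omega
  have hit : ((cs.length : Int) - 1 - ((j1:Int)+1+j2)).toNat = cs.length - 1 - (j1+1+j2) := by omega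
  simp only [e1, if_neg hr, hrt, e2, hit]
  rw [if_neg hi]

-- the splice strings agree in case 3 -------------------------------------------

lemma strings_case3 (cs : List Char) (j1 j2 : Nat) (hj1 : j1 < cs.length)
    (hj2 : j2 < cs.length - (j1+1)) :
    (cs.reverse.take (j1+1) ++ (cs.reverse.drop (j1+1)).take j2 ++
        '1' :: (cs.reverse.drop (j1+1)).drop (j2+1)).reverse =
      cs.take (cs.length - 1 - (j1+1+j2)) ++ '1' :: cs.drop (cs.length - 1 - (j1+1+j2) + 1) := by
  have hm : j1 + 1 + j2 < cs.length := by omega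
  have e1 : (cs.reverse.drop (j1+1)).drop (j2+1) = cs.reverse.drop (j1+1+j2+1) := by
    rw [List.drop_drop]; congr 1
  have e3 : cs.reverse.take (j1+1) ++ (cs.reverse.drop (j1+1)).take j2 = cs.reverse.take (j1+1+j2) := by
    rw [← List.take_add]
  have e4 : (cs.reverse.drop (j1+1+j2+1)).reverse = cs.take (cs.length - 1 - (j1+1+j2)) := by
    have h := (List.reverse_take (l := cs) (i := cs.length - (j1+1+j2+1)))
    have hnm : cs.length - (cs.length - (j1+1+j2+1)) = j1+1+j2+1 := by omega
    rw [hnm] at h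
    rw [← h, List.reverse_reverse]
    congr 1
    omega
  have e5 : (cs.reverse.take (j1+1+j2)).reverse = cs.drop (cs.length - 1 - (j1+1+j2) + 1) := by
    have h := (List.reverse_take (l := cs.reverse) (i := j1+1+j2))
    rw [List.reverse_reverse, List.length_reverse] at h
    rw [h]
    congr 1
    omega
  calc (cs.reverse.take (j1+1) ++ (cs.reverse.drop (j1+1)).take j2 ++
          '1' :: (cs.reverse.drop (j1+1)).drop (j2+1)).reverse
      = ((cs.reverse.take (j1+1) ++ (cs.reverse.drop (j1+1)).take j2) ++
          '1' :: (cs.reverse.drop (j1+1)).drop (j2+1)).reverse := by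
        rw [List.append_assoc]
    _ = (cs.reverse.take (j1+1+j2) ++ '1' :: cs.reverse.drop (j1+1+j2+1)).reverse := by
        rw [e3, e1]
    _ = (cs.reverse.drop (j1+1+j2+1)).reverse ++ '1' :: (cs.reverse.take (j1+1+j2)).reverse := by
        simp [List.reverse_append]
    _ = cs.take (cs.length - 1 - (j1+1+j2)) ++ '1' :: cs.drop (cs.length - 1 - (j1+1+j2) + 1) := by
        rw [e4, e5]

theorem turn_on_list (cs : List Char) :
    turn_on_next_zero_after_one (String.ofList cs) = turn_on_next_zero_after_one_alt (String.ofList cs) := by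
  cases h1 : pvFirstIdx '1' cs.reverse with
  | none => rw [A_case1 cs h1, B_case1 cs h1]
  | some j1 =>
    have hj1 : j1 < cs.length := by simpa using pvFirstIdx_lt h1
    cases h2 : pvFirstIdx '0' (cs.reverse.drop (j1+1)) with
    | none => rw [A_case2 cs j1 h1 h2, B_case2 cs j1 h1 h2]
    | some j2 =>
      have hj2 : j2 < cs.length - (j1+1) := by simpa using pvFirstIdx_lt h2
      rw [A_case3 cs j1 j2 h1 h2, B_case3 cs j1 j2 h1 h2,
        strings_case3 cs j1 j2 hj1 hj2]
      simp only [Prod.mk.injEq, true_and]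
      omega

theorem turn_on_string (s : String) :
    turn_on_next_zero_after_one s = turn_on_next_zero_after_one_alt s := by
  have h := turn_on_list s.toList
  rwa [String.ofList_toList] at h

-- ===== VERDICT (by name: the statement is the Claim_ definition above) =====
theorem turn_on_next_zero_after_one_spec : Claim_equal_turn_on_next_zero_after_one := by
  intro s _
  unfold Spec_turn_on_next_zero_after_one
  exact turn_on_string s
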